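-- pv_equiv track=rewrite | github.com/AkamazZz/design-scrapper | skills/design-scraper/scripts/mobile_design_orchestrator/analysis.py | _infer_component_tags
-- ===== SOURCE A (Python) =====
-- COMPONENT_KEYWORDS = {
--     "nav_bar": ("nav", "navigation", "tab", "menu"),
--     "button": ("button", "cta", "continue", "start", "next", "save"),
--     "list": ("list", "feed", "library", "history"),
--     "card": ("card", "summary", "tile", "widget"),
--     "progress": ("progress", "ring", "gauge", "meter", "stats"),
--     "text_field": ("search", "field", "input", "log", "scan"),
-- }
--
-- def _infer_component_tags(text: str, purpose: str) -> list[str]: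
--     tags = {purpose}
--     for component, keywords in COMPONENT_KEYWORDS.items():
--         if any(keyword in text for keyword in keywords):
--             tags.add(component)
--     if purpose in {"dashboard", "detail"}:
--         tags.add("card")
--     if purpose == "navigation":
--         tags.add("nav_bar")
--     if purpose == "form":
--         tags.add("text_field")
--         tags.add("button")
--     return sorted(tags)
-- ===== SOURCE B (Python) =====
-- _CANDIDATES = (
--     ("button", ("button", "cta", "continue", "start", "next", "save")),
--     ("card", ("card", "summary", "tile", "widget")),
--     ("list", ("list", "feed", "library", "history")),
--     ("nav_bar", ("nav", "navigation", "tab", "menu")),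
--     ("progress", ("progress", "ring", "gauge", "meter", "stats")),
--     ("text_field", ("search", "field", "input", "log", "scan")),
-- )
--
--
-- def _infer_component_tags(text: str, purpose: str) -> list[str]:
--     # Components in sorted order; a component is in iff a keyword hits or purpose forces it.
--     comps = []
--     for comp, keywords in _CANDIDATES:
--         forced = ((comp == "card" and purpose in ("dashboard", "detail"))
--                   or (comp == "nav_bar" and purpose == "navigation")
--                   or (purpose == "form" and comp in ("button", "text_field")))
--         if forced or any(k in text for k in keywords):
--             comps.append(comp)
--     # Insert purpose into the already-sorted comps (skip if equal to a component).
--     out = []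
--     placed = False
--     for c in comps:
--         if not placed and purpose <= c:
--             if purpose != c:
--                 out.append(purpose)
--             placed = True
--         out.append(c)
--     if not placed:
--         out.append(purpose)
--     return out
-- ===== Notes on version B (the rewrite author's own statement) =====
-- stated objective: alternative
-- what changed: B replaces A's set-accumulate-then-sort (build a Python set from dict scans and purpose special-cases, then sorted()) by emitting the components in a pre-sorted candidate table with the purpose special-cases folded into each component's inclusion test, and then ordered-inserting the purpose into that sorted list, so no set and no sort call are used.
import Mathlib
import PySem

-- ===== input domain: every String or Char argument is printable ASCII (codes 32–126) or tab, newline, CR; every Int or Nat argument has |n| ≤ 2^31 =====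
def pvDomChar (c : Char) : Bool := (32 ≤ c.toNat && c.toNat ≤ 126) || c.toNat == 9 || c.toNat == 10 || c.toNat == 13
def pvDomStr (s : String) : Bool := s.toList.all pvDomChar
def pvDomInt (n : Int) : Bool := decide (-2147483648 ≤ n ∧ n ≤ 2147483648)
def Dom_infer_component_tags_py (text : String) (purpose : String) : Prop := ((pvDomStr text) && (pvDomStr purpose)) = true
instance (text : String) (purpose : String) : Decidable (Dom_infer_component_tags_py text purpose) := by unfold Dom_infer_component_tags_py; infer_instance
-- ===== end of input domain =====

-- B builds the result in sorted order from a pre-sorted candidate table (with the purpose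
-- special-cases folded into each component's inclusion test) and ordered-inserts the purpose,
-- instead of A's set-accumulate-then-sort: an alternative decomposition, no speed claim.

-- ===== PORT A =====
-- COMPONENT_KEYWORDS, in dict insertion order
def pvKeywordsA : List (String × List String) :=
  [("nav_bar", ["nav", "navigation", "tab", "menu"]),
   ("button", ["button", "cta", "continue", "start", "next", "save"]),
   ("list", ["list", "feed", "library", "history"]),
   ("card", ["card", "summary", "tile", "widget"]),
   ("progress", ["progress", "ring", "gauge", "meter", "stats"]),
   ("text_field", ["search", "field", "input", "log", "scan"])]

def infer_component_tags_py (text : String) (purpose : String) : List String :=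
  let tags : PySem.Set String := PySem.Set.ofList [purpose]
  let tags := pvKeywordsA.foldl (fun tags ckw =>
    if ckw.2.any (fun k => PySem.Str.isIn k text) then PySem.Set.add tags ckw.1 else tags) tags
  let tags := if purpose = "dashboard" ∨ purpose = "detail" then PySem.Set.add tags "card" else tags
  let tags := if purpose = "navigation" then PySem.Set.add tags "nav_bar" else tags
  let tags := if purpose = "form" then PySem.Set.add (PySem.Set.add tags "text_field") "button" else tags
  PySem.List.sorted tags (fun x => x) false

-- ===== PORT B =====
-- _CANDIDATES: the components in sorted order, each with its keywords
def pvCandsB : List (String × List String) :=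
  [("button", ["button", "cta", "continue", "start", "next", "save"]),
   ("card", ["card", "summary", "tile", "widget"]),
   ("list", ["list", "feed", "library", "history"]),
   ("nav_bar", ["nav", "navigation", "tab", "menu"]),
   ("progress", ["progress", "ring", "gauge", "meter", "stats"]),
   ("text_field", ["search", "field", "input", "log", "scan"])]

def pvForcedB (purpose c : String) : Bool :=
  (c == "card" && (purpose == "dashboard" || purpose == "detail"))
  || (c == "nav_bar" && purpose == "navigation")
  || (purpose == "form" && (c == "button" || c == "text_field"))

-- the second loop of B: ordered insertion of purpose into the sorted comps
def pvInsOrd (p : String) : List String → List String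
  | [] => [p]
  | c :: rest =>
      if p ≤ c then (if p = c then c :: rest else p :: c :: rest)
      else c :: pvInsOrd p rest

def infer_component_tags_py_alt (text : String) (purpose : String) : List String :=
  let comps := (pvCandsB.filter (fun ckw =>
    pvForcedB purpose ckw.1 || ckw.2.any (fun k => PySem.Str.isIn k text))).map Prod.fst
  pvInsOrd purpose comps

-- ===== PRECONDITION & SPEC =====
def Spec_infer_component_tags_py (text : String) (purpose : String) (out : List String) : Prop := out = infer_component_tags_py_alt text purpose
instance (text : String) (purpose : String) (out : List String) : Decidable (Spec_infer_component_tags_py text purpose out) := by unfold Spec_infer_component_tags_py; infer_instance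

-- ===== CLAIM (what is proved, stated in full; the proofs are below) =====
def Claim_equal_infer_component_tags_py : Prop := ∀ (text : String) (purpose : String), Dom_infer_component_tags_py text purpose → Spec_infer_component_tags_py text purpose (infer_component_tags_py text purpose)

-- ===== LEMMAS AND PROOFS =====

-- the set A has accumulated (stage by stage) just before its final sorted() call
def pvT1 (text purpose : String) : PySem.Set String :=
  pvKeywordsA.foldl (fun tags ckw =>
    if ckw.2.any (fun k => PySem.Str.isIn k text) then PySem.Set.add tags ckw.1 else tags)
    (PySem.Set.ofList [purpose])

def pvT2 (text purpose : String) : PySem.Set String :=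
  if purpose = "dashboard" ∨ purpose = "detail" then PySem.Set.add (pvT1 text purpose) "card"
  else pvT1 text purpose

def pvT3 (text purpose : String) : PySem.Set String :=
  if purpose = "navigation" then PySem.Set.add (pvT2 text purpose) "nav_bar" else pvT2 text purpose

def pvListA (text purpose : String) : List String :=
  if purpose = "form" then PySem.Set.add (PySem.Set.add (pvT3 text purpose) "text_field") "button"
  else pvT3 text purpose

theorem portA_eq (text purpose : String) :
    infer_component_tags_py text purpose =
      PySem.List.sorted (pvListA text purpose) (fun x => x) false := rfl

-- membership in A's keyword-scan foldl
theorem mem_foldl_addIf (p : String × List String → Bool) :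
    ∀ (l : List (String × List String)) (s : PySem.Set String) (x : String),
      x ∈ l.foldl (fun s c => if p c then PySem.Set.add s c.1 else s) s ↔
        x ∈ s ∨ ∃ c ∈ l, p c = true ∧ c.1 = x := by
  intro l
  induction l with
  | nil => simp
  | cons c rest ih =>
      intro s x
      simp only [List.foldl_cons, List.mem_cons]
      by_cases hc : p c = true <;>
        · simp [hc, ih, PySem.Set.mem_add]
          try tauto

theorem nodup_foldl_addIf (p : String × List String → Bool) :
    ∀ (l : List (String × List String)) (s : PySem.Set String), s.Nodup →
      (l.foldl (fun s c => if p c then PySem.Set.add s c.1 else s) s).Nodup := by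
  intro l
  induction l with
  | nil => intro s hs; simpa using hs
  | cons c rest ih =>
      intro s hs
      simp only [List.foldl_cons]
      by_cases hc : p c = true
      · simp only [hc, if_true]
        exact ih _ (PySem.Set.nodup_add _ _ hs)
      · simp only [hc]
        exact ih _ hs

theorem mem_insOrd (p x : String) : ∀ (l : List String), x ∈ pvInsOrd p l ↔ x = p ∨ x ∈ l := by
  intro l
  induction l with
  | nil => simp [pvInsOrd]
  | cons c rest ih =>
      simp only [pvInsOrd]
      split_ifs with h1 h2
      · subst h2
        simp only [List.mem_cons]
        try tauto
      · simp only [List.mem_cons]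
        try tauto
      · simp only [List.mem_cons, ih]
        try tauto

theorem pairwise_insOrd (p : String) :
    ∀ (l : List String), l.Pairwise (· < ·) → (pvInsOrd p l).Pairwise (· < ·) := by
  intro l
  induction l with
  | nil => intro _; simp [pvInsOrd]
  | cons c rest ih =>
      intro hpw
      rw [List.pairwise_cons] at hpw
      obtain ⟨hc, hrest⟩ := hpw
      simp only [pvInsOrd]
      split_ifs with h1 h2
      · subst h2
        exact List.pairwise_cons.mpr ⟨hc, hrest⟩
      · have hpc : p < c := lt_of_le_of_ne h1 h2
        refine List.pairwise_cons.mpr ⟨?_, List.pairwise_cons.mpr ⟨hc, hrest⟩⟩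
        intro y hy
        rcases List.mem_cons.mp hy with rfl | hy
        · exact hpc
        · exact lt_trans hpc (hc y hy)
      · have hcp : c < p := lt_of_not_ge h1
        refine List.pairwise_cons.mpr ⟨?_, ih hrest⟩
        intro y hy
        rcases (mem_insOrd p y rest).mp hy with rfl | hy
        · exact hcp
        · exact hc y hy

theorem pairwise_compsB (text purpose : String) :
    ((pvCandsB.filter (fun ckw =>
        pvForcedB purpose ckw.1 || ckw.2.any (fun k => PySem.Str.isIn k text))).map Prod.fst).Pairwise
      (· < ·) := by
  have h1 : (((pvCandsB.map Prod.fst).map String.toList).Pairwise (· < ·)) := by decide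
  have hbase : (pvCandsB.map Prod.fst).Pairwise (· < ·) :=
    (List.pairwise_map.mp h1).imp (fun h => String.lt_iff_toList_lt.mpr h)
  have := (List.pairwise_map.mp hbase).filter
      (fun ckw => pvForcedB purpose ckw.1 || ckw.2.any (fun k => PySem.Str.isIn k text))
  exact List.pairwise_map.mpr this

-- stage-by-stage membership characterisations of A's set
theorem mem_T1 (text purpose x : String) : x ∈ pvT1 text purpose ↔
    x = purpose
    ∨ ((["nav", "navigation", "tab", "menu"].any (fun k => PySem.Str.isIn k text)) = true ∧ "nav_bar" = x)
    ∨ ((["button", "cta", "continue", "start", "next", "save"].any (fun k => PySem.Str.isIn k text)) = true ∧ "button" = x)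
    ∨ ((["list", "feed", "library", "history"].any (fun k => PySem.Str.isIn k text)) = true ∧ "list" = x)
    ∨ ((["card", "summary", "tile", "widget"].any (fun k => PySem.Str.isIn k text)) = true ∧ "card" = x)
    ∨ ((["progress", "ring", "gauge", "meter", "stats"].any (fun k => PySem.Str.isIn k text)) = true ∧ "progress" = x)
    ∨ ((["search", "field", "input", "log", "scan"].any (fun k => PySem.Str.isIn k text)) = true ∧ "text_field" = x) := by
  unfold pvT1
  rw [mem_foldl_addIf]
  simp only [pvKeywordsA, List.mem_cons, List.not_mem_nil, exists_eq_or_imp, exists_eq_left,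
    or_false, PySem.Set.mem_ofList]

theorem mem_T2 (text purpose x : String) : x ∈ pvT2 text purpose ↔
    x ∈ pvT1 text purpose ∨ ((purpose = "dashboard" ∨ purpose = "detail") ∧ "card" = x) := by
  unfold pvT2
  split_ifs with h
  · simp only [PySem.Set.mem_add, h]
    tauto
  · tauto

theorem mem_T3 (text purpose x : String) : x ∈ pvT3 text purpose ↔
    x ∈ pvT2 text purpose ∨ (purpose = "navigation" ∧ "nav_bar" = x) := by
  unfold pvT3
  split_ifs with h
  · simp only [PySem.Set.mem_add, h]
    tauto
  · tauto

theorem mem_listA (text purpose x : String) : x ∈ pvListA text purpose ↔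
    x ∈ pvT3 text purpose ∨ (purpose = "form" ∧ ("text_field" = x ∨ "button" = x)) := by
  unfold pvListA
  split_ifs with h
  · simp only [PySem.Set.mem_add, h]
    tauto
  · tauto

-- membership characterisation of B's output
theorem mem_altB (text purpose x : String) : x ∈ infer_component_tags_py_alt text purpose ↔
    x = purpose
    ∨ (((pvForcedB purpose "button" || (["button", "cta", "continue", "start", "next", "save"].any (fun k => PySem.Str.isIn k text))) = true) ∧ "button" = x)
    ∨ (((pvForcedB purpose "card" || (["card", "summary", "tile", "widget"].any (fun k => PySem.Str.isIn k text))) = true) ∧ "card" = x)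
    ∨ (((pvForcedB purpose "list" || (["list", "feed", "library", "history"].any (fun k => PySem.Str.isIn k text))) = true) ∧ "list" = x)
    ∨ (((pvForcedB purpose "nav_bar" || (["nav", "navigation", "tab", "menu"].any (fun k => PySem.Str.isIn k text))) = true) ∧ "nav_bar" = x)
    ∨ (((pvForcedB purpose "progress" || (["progress", "ring", "gauge", "meter", "stats"].any (fun k => PySem.Str.isIn k text))) = true) ∧ "progress" = x)
    ∨ (((pvForcedB purpose "text_field" || (["search", "field", "input", "log", "scan"].any (fun k => PySem.Str.isIn k text))) = true) ∧ "text_field" = x) := by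
  unfold infer_component_tags_py_alt
  simp only [mem_insOrd, List.mem_map, List.mem_filter, and_assoc, pvCandsB, List.mem_cons,
    List.not_mem_nil, exists_eq_or_imp, exists_eq_left, or_false]

-- each pvForcedB instance, spelled out
theorem forced_spec (purpose : String) :
    (pvForcedB purpose "button" = true ↔ purpose = "form")
    ∧ (pvForcedB purpose "card" = true ↔ (purpose = "dashboard" ∨ purpose = "detail"))
    ∧ (pvForcedB purpose "list" = true ↔ False)
    ∧ (pvForcedB purpose "nav_bar" = true ↔ purpose = "navigation")
    ∧ (pvForcedB purpose "progress" = true ↔ False)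
    ∧ (pvForcedB purpose "text_field" = true ↔ purpose = "form") := by
  unfold pvForcedB
  simp only [Bool.or_eq_true, Bool.and_eq_true, beq_iff_eq, String.reduceEq, false_and, and_false,
    true_and, and_true, false_or, or_false]

-- the propositional skeleton of the two membership characterisations
theorem canon_logic (Xp Xn Xb Xl Xc Xpr Xt Bn Bb Bl Bc Bp Bt Dd Dn Df : Prop) :
    (Xp ∨ ((Df ∨ Bb) ∧ Xb) ∨ ((Dd ∨ Bc) ∧ Xc) ∨ ((False ∨ Bl) ∧ Xl) ∨ ((Dn ∨ Bn) ∧ Xn)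
        ∨ ((False ∨ Bp) ∧ Xpr) ∨ ((Df ∨ Bt) ∧ Xt))
    ↔ ((((Xp ∨ (Bn ∧ Xn) ∨ (Bb ∧ Xb) ∨ (Bl ∧ Xl) ∨ (Bc ∧ Xc) ∨ (Bp ∧ Xpr) ∨ (Bt ∧ Xt))
        ∨ (Dd ∧ Xc)) ∨ (Dn ∧ Xn)) ∨ (Df ∧ (Xt ∨ Xb))) := by
  constructor
  · rintro (hp | ⟨hf | hb, hx⟩ | ⟨hd | hc, hx⟩ | ⟨hF | hl, hx⟩ | ⟨hn | hbn, hx⟩ | ⟨hF | hpr, hx⟩ | ⟨hf | ht, hx⟩)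
    · exact Or.inl (Or.inl (Or.inl (Or.inl hp)))
    · exact Or.inr ⟨hf, Or.inr hx⟩
    · exact Or.inl (Or.inl (Or.inl (Or.inr (Or.inr (Or.inl ⟨hb, hx⟩)))))
    · exact Or.inl (Or.inl (Or.inr ⟨hd, hx⟩))
    · exact Or.inl (Or.inl (Or.inl (Or.inr (Or.inr (Or.inr (Or.inr (Or.inl ⟨hc, hx⟩)))))))
    · exact hF.elim
    · exact Or.inl (Or.inl (Or.inl (Or.inr (Or.inr (Or.inr (Or.inl ⟨hl, hx⟩))))))
    · exact Or.inl (Or.inr ⟨hn, hx⟩)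
    · exact Or.inl (Or.inl (Or.inl (Or.inr (Or.inl ⟨hbn, hx⟩))))
    · exact hF.elim
    · exact Or.inl (Or.inl (Or.inl (Or.inr (Or.inr (Or.inr (Or.inr (Or.inr (Or.inl ⟨hpr, hx⟩))))))))
    · exact Or.inr ⟨hf, Or.inl hx⟩
    · exact Or.inl (Or.inl (Or.inl (Or.inr (Or.inr (Or.inr (Or.inr (Or.inr (Or.inr ⟨ht, hx⟩))))))))
  · rintro ((((hp | ⟨hbn, hx⟩ | ⟨hb, hx⟩ | ⟨hl, hx⟩ | ⟨hc, hx⟩ | ⟨hpr, hx⟩ | ⟨ht, hx⟩) | ⟨hd, hx⟩) | ⟨hn, hx⟩) | ⟨hf, hx | hx⟩)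
    · exact Or.inl hp
    · exact Or.inr (Or.inr (Or.inr (Or.inr (Or.inl ⟨Or.inr hbn, hx⟩))))
    · exact Or.inr (Or.inl ⟨Or.inr hb, hx⟩)
    · exact Or.inr (Or.inr (Or.inr (Or.inl ⟨Or.inr hl, hx⟩)))
    · exact Or.inr (Or.inr (Or.inl ⟨Or.inr hc, hx⟩))
    · exact Or.inr (Or.inr (Or.inr (Or.inr (Or.inr (Or.inl ⟨Or.inr hpr, hx⟩)))))
    · exact Or.inr (Or.inr (Or.inr (Or.inr (Or.inr (Or.inr ⟨Or.inr ht, hx⟩)))))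
    · exact Or.inr (Or.inr (Or.inl ⟨Or.inl hd, hx⟩))
    · exact Or.inr (Or.inr (Or.inr (Or.inr (Or.inl ⟨Or.inl hn, hx⟩))))
    · exact Or.inr (Or.inr (Or.inr (Or.inr (Or.inr (Or.inr ⟨Or.inl hf, hx⟩)))))
    · exact Or.inr (Or.inl ⟨Or.inl hf, hx⟩)

-- the two programs select exactly the same set of strings
theorem mem_eq (text purpose x : String) :
    x ∈ infer_component_tags_py_alt text purpose ↔ x ∈ pvListA text purpose := by
  rw [mem_altB, mem_listA, mem_T3, mem_T2, mem_T1]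
  simp only [Bool.or_eq_true, forced_spec]
  exact canon_logic _ _ _ _ _ _ _ _ _ _ _ _ _ _ _ _

theorem nodup_listA (text purpose : String) : (pvListA text purpose).Nodup := by
  have h1 : (pvT1 text purpose).Nodup := nodup_foldl_addIf
    (fun ckw => ckw.2.any (fun k => PySem.Str.isIn k text))
    pvKeywordsA (PySem.Set.ofList [purpose]) (PySem.Set.nodup_ofList _)
  unfold pvListA pvT3 pvT2
  split_ifs <;> (repeat apply PySem.Set.nodup_add) <;> exact h1

-- ===== VERDICT (by name: the statement is the Claim_ definition above) =====
theorem infer_component_tags_py_spec : Claim_equal_infer_component_tags_py := by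
  intro text purpose _
  unfold Spec_infer_component_tags_py
  rw [portA_eq]
  have hpwB : (infer_component_tags_py_alt text purpose).Pairwise (· < ·) :=
    pairwise_insOrd purpose _ (pairwise_compsB text purpose)
  apply PySem.List.sorted_eq_of_perm_of_pairwise_lt
  · refine (List.perm_ext_iff_of_nodup ?_ ?_).mpr ?_
    · exact hpwB.imp ne_of_lt
    · exact nodup_listA text purpose
    · intro x
      exact mem_eq text purpose x
  · exact hpwB
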